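-- pv_equiv track=rewrite | github.com/sarangs1621/CodeFoeces_Problems | Romanji.py | berlanese
-- ===== SOURCE A (Python) =====
-- def berlanese(word):
--     vowels = 'aeiou'
--     n = len(word)
--     for i in range(n):
--         if word[i] not in vowels and word[i] != 'n':
--             if i == n - 1 or word[i + 1] not in vowels:
--                 return 'NO'
--     return 'YES'
-- ===== SOURCE B (Python) =====
-- def berlanese(word):
--     vowels = 'aeiou'
--     prev_is_vowel = False  # nothing follows the last character
--     for ch in reversed(word):
--         if ch not in vowels and ch != 'n':
--             if not prev_is_vowel:
--                 return 'NO'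
--         prev_is_vowel = ch in vowels
--     return 'YES'
-- ===== Notes on version B (the rewrite author's own statement) =====
-- stated objective: alternative
-- what changed: Replaces the forward index loop with lookahead word[i+1] and the i==n-1 boundary test by a right-to-left scan carrying a prev_is_vowel flag, eliminating indexing entirely.
import Mathlib
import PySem

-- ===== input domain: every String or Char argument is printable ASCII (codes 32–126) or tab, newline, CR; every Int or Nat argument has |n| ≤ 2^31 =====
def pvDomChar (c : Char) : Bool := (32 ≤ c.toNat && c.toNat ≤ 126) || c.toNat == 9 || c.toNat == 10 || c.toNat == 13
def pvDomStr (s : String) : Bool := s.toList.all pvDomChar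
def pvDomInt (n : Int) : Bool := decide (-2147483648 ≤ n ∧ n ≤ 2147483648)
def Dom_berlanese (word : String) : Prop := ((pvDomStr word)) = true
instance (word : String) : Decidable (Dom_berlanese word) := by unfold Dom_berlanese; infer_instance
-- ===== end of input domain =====

-- B replaces A's forward index loop with lookahead word[i+1] by a right-to-left scan
-- carrying a prev_is_vowel flag (objective: alternative decomposition, no indexing).

-- 'c in "aeiou"' for a single character
def pvIsVowel (c : Char) : Bool := c == 'a' || c == 'e' || c == 'i' || c == 'o' || c == 'u'

-- ===== PORT A =====
-- A's loop 'for i in range(n)' over indices; word[i]/word[i+1] are always in range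
-- (i < n, and word[i+1] is read only when i ≠ n-1), so List.getD is exact here.
def berlaneseA_go (l : List Char) (n i : Nat) : String :=
  if _h : i < n then
    if ¬ pvIsVowel (l.getD i ' ') ∧ l.getD i ' ' ≠ 'n' then
      if i == n - 1 || ¬ pvIsVowel (l.getD (i + 1) ' ') then "NO"
      else berlaneseA_go l n (i + 1)
    else berlaneseA_go l n (i + 1)
  else "YES"
termination_by n - i

def berlanese (word : String) : String :=
  berlaneseA_go word.toList word.toList.length 0

-- ===== PORT B =====
-- Source B's loop over reversed(word) with the prev_is_vowel accumulator.
def berlaneseB_go : List Char → Bool → String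
  | [], _ => "YES"
  | c :: rest, prev =>
    if (¬ pvIsVowel c ∧ c ≠ 'n') ∧ prev = false then "NO"
    else berlaneseB_go rest (pvIsVowel c)

def berlanese_alt (word : String) : String :=
  berlaneseB_go word.toList.reverse false

-- ===== PRECONDITION & SPEC =====
def Spec_berlanese (word : String) (out : String) : Prop := out = berlanese_alt word
instance (word : String) (out : String) : Decidable (Spec_berlanese word out) := by unfold Spec_berlanese; infer_instance

-- ===== CLAIM (what is proved, stated in full; the proofs are below) =====
def Claim_equal_berlanese : Prop := ∀ (word : String), Dom_berlanese word → Spec_berlanese word (berlanese word)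

-- ===== LEMMAS AND PROOFS =====

-- common forward characterisation: 'every char of l is a vowel, an 'n', or followed by a
-- vowel', where prev says whether the character just after l (if any) is a vowel
def pvOk : List Char → Bool → Bool
  | [], _ => true
  | c :: rest, prev =>
    (pvIsVowel c || c == 'n' || (match rest with | [] => prev | d :: _ => pvIsVowel d))
      && pvOk rest prev

theorem pvOk_append_singleton (l : List Char) (a : Char) (prev : Bool) :
    pvOk (l ++ [a]) prev
      = (pvOk l (pvIsVowel a) && (pvIsVowel a || a == 'n' || prev)) := by
  induction l with
  | nil => simp [pvOk]
  | cons c rest ih =>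
      cases rest with
      | nil => simp [pvOk] at ih ⊢
      | cons d rest' => simp [pvOk] at ih ⊢; rw [ih]; simp [Bool.and_assoc]

theorem berlaneseB_go_eq (l : List Char) (prev : Bool) :
    berlaneseB_go l.reverse prev = if pvOk l prev then "YES" else "NO" := by
  induction l using List.reverseRecOn generalizing prev with
  | nil => simp [berlaneseB_go, pvOk]
  | append_singleton l a ih =>
      rw [List.reverse_append, List.reverse_singleton, List.singleton_append,
        pvOk_append_singleton, berlaneseB_go]
      by_cases hv : pvIsVowel a
      · simp [hv, ih]
      · by_cases hn : a = 'n'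
        · simp [hn, ih]
        · rw [Bool.not_eq_true] at hv
          cases prev <;> simp [hv, hn, ih]

theorem berlaneseA_go_eq (l : List Char) (i : Nat) (hi : i ≤ l.length) :
    berlaneseA_go l l.length i = if pvOk (l.drop i) false then "YES" else "NO" := by
  rw [berlaneseA_go]
  by_cases h : i < l.length
  · have hdrop : l.drop i = l[i] :: l.drop (i + 1) := List.drop_eq_getElem_cons h
    have hget : l.getD i ' ' = l[i] := List.getD_eq_getElem l ' ' h
    have ih := berlaneseA_go_eq l (i + 1) h
    simp only [hget, dif_pos h]
    by_cases hv : pvIsVowel l[i]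
    · rw [if_neg (by simp [hv]), ih, hdrop]
      simp [pvOk, hv]
    · by_cases hn : l[i] = 'n'
      · rw [if_neg (by simp [hn]), ih, hdrop]
        simp [pvOk, hn]
      · rw [if_pos ⟨by simp [hv], hn⟩]
        by_cases hlast : i = l.length - 1
        · have hempty : l.drop (i + 1) = [] := by
            apply List.drop_eq_nil_of_le; omega
          rw [if_pos (by simp [hlast]), hdrop, hempty]
          simp [pvOk, hv, hn]
        · have hlt : i + 1 < l.length := by omega
          have hdrop2 : l.drop (i + 1) = l[i+1] :: l.drop (i + 2) :=
            List.drop_eq_getElem_cons hlt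
          have hget2 : l.getD (i + 1) ' ' = l[i+1] := List.getD_eq_getElem l ' ' hlt
          rw [hget2, hdrop, hdrop2]
          by_cases hv2 : pvIsVowel l[i+1]
          · rw [if_neg (by simp [hlast, hv2]), ih, hdrop2]
            simp [pvOk, hv, hv2]
          · rw [if_pos (by simp [hv2])]
            simp [pvOk, hv, hn, hv2]
  · have : i = l.length := by omega
    rw [dif_neg h, this, List.drop_length]
    simp [pvOk]
termination_by l.length - i

-- ===== VERDICT (by name: the statement is the Claim_ definition above) =====
theorem berlanese_spec : Claim_equal_berlanese := by
  intro word _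
  unfold Spec_berlanese berlanese berlanese_alt
  rw [berlaneseA_go_eq word.toList 0 (Nat.zero_le _), berlaneseB_go_eq]
  simp
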